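-- pv_equiv track=rewrite | github.com/hopeskair/Chinese-ancient-book-recognition-HSK | chinese_components/generate_chinese_split.py | get_all_compo
-- ===== SOURCE A (Python) =====
-- def get_all_compo(c, split_dict):
--     if c not in split_dict or split_dict[c] == [c]:
--         return [c]
--     elif len(split_dict[c]) == 1:
--         return split_dict[c]
--     else:
--         components = split_dict[c]
--         sub_compo = []
--         [sub_compo.extend(get_all_compo(c, split_dict)) for c in components]
--         return sub_compo + components
-- ===== SOURCE B (Python) =====
-- def get_all_compo(c, split_dict):
--     # Iterative explicit-stack rewrite: builds the post-order expansion back-to-front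
--     # in one output list, instead of A's recursion with repeated list concatenations.
--     out = []
--     stack = [c]
--     while stack:
--         x = stack.pop()
--         comps = split_dict.get(x)
--         if comps is None or comps == [x]:
--             out.append(x)
--         elif len(comps) == 1:
--             out.append(comps[0])
--         else:
--             out.extend(reversed(comps))
--             stack.extend(comps)
--     return out[::-1]
-- ===== Notes on version B (the rewrite author's own statement) =====
-- stated objective: alternative
-- what changed: Replaces A's recursion (with repeated list concatenations per level) by an iterative explicit-stack loop that emits the whole expansion back-to-front into a single output list, reversed once at the end.
import Mathlib
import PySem

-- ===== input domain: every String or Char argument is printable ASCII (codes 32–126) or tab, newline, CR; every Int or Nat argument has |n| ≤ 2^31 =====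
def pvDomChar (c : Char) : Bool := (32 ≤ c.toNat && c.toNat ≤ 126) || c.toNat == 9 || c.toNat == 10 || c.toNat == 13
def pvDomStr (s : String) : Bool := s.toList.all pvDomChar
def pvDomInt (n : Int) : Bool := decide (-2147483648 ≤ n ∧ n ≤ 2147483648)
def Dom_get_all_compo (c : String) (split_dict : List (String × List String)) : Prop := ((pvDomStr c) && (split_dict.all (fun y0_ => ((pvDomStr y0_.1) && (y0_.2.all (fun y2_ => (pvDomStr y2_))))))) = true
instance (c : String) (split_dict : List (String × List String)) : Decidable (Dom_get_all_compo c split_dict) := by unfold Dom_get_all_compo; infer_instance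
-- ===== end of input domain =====

-- B replaces A's recursion by an explicit-stack loop that emits the same expansion
-- back-to-front (objective: alternative structure, same exact output).

-- ===== PORT A =====
-- A's recursion, with a fuel guard for totality only: on inputs satisfying
-- Pre_get_all_compo the recursion depth is at most split_dict.length + 2, so the
-- fuel never runs out there and each step is a literal transliteration of A.
def expandA (d : List (String × List String)) : Nat → String → List String
  | 0, c => [c]                                   -- fuel exhausted (unreachable under Pre_)
  | k+1, c =>
    match List.lookup c d with                    -- 'c not in split_dict' / 'split_dict[c]'
    | none => [c]
    | some comps =>
      if comps = [c] then [c]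
      else if comps.length = 1 then comps
      else (comps.flatMap (fun x => expandA d k x)) ++ comps   -- the comprehension's extends, then '+ components'

def get_all_compo (c : String) (split_dict : List (String × List String)) : List String :=
  expandA split_dict (split_dict.length + 2) c

-- ===== PORT B =====
-- fuel bound for the loop (guard only: the loop stops by itself when the stack empties)
def maxLenB (d : List (String × List String)) : Nat :=
  d.foldr (fun p acc => max p.2.length acc) 0

-- the while-loop of Source B; stack head = python list tail (pop/extend at the end);
-- out is built by appends exactly as in Source B and reversed at the end.
def machineB (d : List (String × List String)) : Nat → List String → List String → List String
  | _, [], out => out                             -- while stack: loop ends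
  | 0, _ :: _, out => out                         -- fuel exhausted (unreachable under Pre_)
  | f+1, x :: rest, out =>
    match List.lookup x d with                    -- split_dict.get(x)
    | none => machineB d f rest (out ++ [x])      -- comps is None: out.append(x)
    | some comps =>
      if comps = [x] then machineB d f rest (out ++ [x])
      else if comps.length = 1 then machineB d f rest (out ++ comps)   -- out.append(comps[0]) = out ++ comps (length 1)
      else machineB d f (comps.reverse ++ rest) (out ++ comps.reverse) -- extend(reversed(comps)); stack.extend(comps)

def get_all_compo_alt (c : String) (split_dict : List (String × List String)) : List String :=
  (machineB split_dict ((maxLenB split_dict + 1) ^ (split_dict.length + 2)) [c] []).reverse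

-- ===== PRECONDITION & SPEC =====
-- okN d k c: the 'splits into' relation (an edge from a key to each of its components,
-- present only where A actually recurses) is well-founded below c with height < k.
-- It is a shape condition on the component graph of the input (it computes no output
-- of either program); okN with k = split_dict.length + 2 holds iff that graph below c
-- is acyclic, i.e. iff Python A's recursion terminates.
def okN (d : List (String × List String)) : Nat → String → Bool
  | 0, _ => false
  | k+1, c =>
    match List.lookup c d with
    | none => true
    | some comps =>
      if comps = [c] then true
      else if comps.length = 1 then true
      else comps.all (okN d k)

-- Pre_ excludes exactly the inputs on which Python A never returns (cyclic split
-- chains: A hits RecursionError). On every terminating input the chain of expanded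
-- keys is duplicate-free, so its height is ≤ split_dict.length + 2 and Pre_ holds.
def Pre_get_all_compo (c : String) (split_dict : List (String × List String)) : Prop :=
  okN split_dict (split_dict.length + 2) c = true
instance (c : String) (split_dict : List (String × List String)) : Decidable (Pre_get_all_compo c split_dict) := by unfold Pre_get_all_compo; infer_instance

def pvWitness_get_all_compo : String × (List (String × List String)) :=
  ("A", [("A", ["B", "C"]), ("B", ["D"])])

def Spec_get_all_compo (c : String) (split_dict : List (String × List String)) (out : List String) : Prop := out = get_all_compo_alt c split_dict
instance (c : String) (split_dict : List (String × List String)) (out : List String) : Decidable (Spec_get_all_compo c split_dict out) := by unfold Spec_get_all_compo; infer_instance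

-- ===== CLAIM (what is proved, stated in full; the proofs are below) =====
def Claim_equal_get_all_compo : Prop := ∀ (c : String) (split_dict : List (String × List String)), Dom_get_all_compo c split_dict → Pre_get_all_compo c split_dict → Spec_get_all_compo c split_dict (get_all_compo c split_dict)

-- ===== LEMMAS AND PROOFS =====

-- number of loop iterations B spends on one stack entry (proof-only helper)
def costB (d : List (String × List String)) : Nat → String → Nat
  | 0, _ => 0
  | k+1, c =>
    match List.lookup c d with
    | none => 1
    | some comps =>
      if comps = [c] then 1
      else if comps.length = 1 then 1
      else 1 + (comps.map (costB d k)).sum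

lemma lookup_le_maxLenB (d : List (String × List String)) (x : String) (comps : List String)
    (h : List.lookup x d = some comps) : comps.length ≤ maxLenB d := by
  induction d with
  | nil => simp [List.lookup] at h
  | cons p rest ih =>
    rw [List.lookup] at h
    by_cases hx : x = p.1
    · simp [hx] at h
      simp [maxLenB, ← h]
    · have : (x == p.1) = false := by simp [hx]
      rw [this] at h
      have := ih h
      simp only [maxLenB, List.foldr] at *
      omega

lemma costB_le (d : List (String × List String)) (k : Nat) :
    ∀ c, okN d k c = true → costB d k c ≤ (maxLenB d + 1) ^ k := by
  induction k with
  | zero => intro c h; simp [okN] at h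
  | succ k ih =>
    intro c h
    have hone : 1 ≤ (maxLenB d + 1) ^ (k + 1) := Nat.one_le_pow _ _ (by omega)
    rw [okN] at h
    rw [costB]
    cases hl : List.lookup c d with
    | none => simpa using hone
    | some comps =>
      rw [hl] at h
      simp only
      by_cases h1 : comps = [c]
      · simpa [h1] using hone
      · by_cases h2 : comps.length = 1
        · simpa [h1, h2] using hone
        · simp only [h1, h2, if_false] at h ⊢
          have hall : ∀ z ∈ comps, okN d k z = true := by
            simpa [List.all_eq_true] using h
          have hsum : (comps.map (costB d k)).sum ≤ comps.length * ((maxLenB d + 1) ^ k) := by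
            have := List.sum_le_card_nsmul (comps.map (costB d k)) ((maxLenB d + 1) ^ k)
              (by intro x hx
                  simp only [List.mem_map] at hx
                  obtain ⟨z, hz, rfl⟩ := hx
                  exact ih z (hall z hz))
            simpa [smul_eq_mul] using this
          have hlen : comps.length ≤ maxLenB d := lookup_le_maxLenB d c comps hl
          have : (maxLenB d + 1) ^ (k + 1) = (maxLenB d) * (maxLenB d + 1) ^ k + (maxLenB d + 1) ^ k := by
            ring
          have hk : 1 ≤ (maxLenB d + 1) ^ k := Nat.one_le_pow _ _ (by omega)
          calc 1 + (comps.map (costB d k)).sum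
              ≤ 1 + comps.length * ((maxLenB d + 1) ^ k) := by omega
            _ ≤ 1 + maxLenB d * ((maxLenB d + 1) ^ k) := by
                have := Nat.mul_le_mul_right ((maxLenB d + 1) ^ k) hlen; omega
            _ ≤ (maxLenB d + 1) ^ (k + 1) := by omega

lemma machineB_run (d : List (String × List String)) (k : Nat) :
    ∀ (ys : List String), (∀ y ∈ ys, okN d k y = true) →
    ∀ (fuel : Nat) (rest out : List String),
      machineB d ((ys.map (costB d k)).sum + fuel) (ys ++ rest) out
        = machineB d fuel rest (out ++ ys.flatMap (fun y => (expandA d k y).reverse)) := by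
  induction k with
  | zero =>
    intro ys hys fuel rest out
    cases ys with
    | nil => simp
    | cons y ys => have := hys y (by simp); simp [okN] at this
  | succ k ih =>
    intro ys hys fuel rest out
    induction ys generalizing out with
    | nil => simp
    | cons y ys ihy =>
      have hy : okN d (k+1) y = true := hys y (by simp)
      have hys' : ∀ z ∈ ys, okN d (k+1) z = true := fun z hz => hys z (by simp [hz])
      rw [okN] at hy
      simp only [List.map_cons, List.sum_cons, List.cons_append, List.flatMap_cons]
      cases hl : List.lookup y d with
      | none =>
        have hc : costB d (k+1) y = 1 := by rw [costB, hl]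
        have hstep : costB d (k+1) y + (ys.map (costB d (k+1))).sum + fuel
            = ((ys.map (costB d (k+1))).sum + fuel) + 1 := by omega
        rw [hstep, machineB, hl]
        rw [ihy hys' (out ++ [y])]
        simp [expandA, hl]
      | some comps =>
        rw [hl] at hy
        by_cases h1 : comps = [y]
        · have hc : costB d (k+1) y = 1 := by rw [costB, hl]; simp [h1]
          have hstep : costB d (k+1) y + (ys.map (costB d (k+1))).sum + fuel
              = ((ys.map (costB d (k+1))).sum + fuel) + 1 := by omega
          rw [hstep, machineB, hl]
          simp only [h1, if_pos]
          rw [ihy hys' (out ++ [y])]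
          simp [expandA, hl, h1]
        · by_cases h2 : comps.length = 1
          · have hc : costB d (k+1) y = 1 := by rw [costB, hl]; simp [h1, h2]
            have hstep : costB d (k+1) y + (ys.map (costB d (k+1))).sum + fuel
                = ((ys.map (costB d (k+1))).sum + fuel) + 1 := by omega
            rw [hstep, machineB, hl]
            simp only [h1, if_false, h2, if_pos]
            rw [ihy hys' (out ++ comps)]
            obtain ⟨z, rfl⟩ := List.length_eq_one_iff.mp h2
            simp [expandA, hl, h1, h2]
          · have hall : ∀ z ∈ comps, okN d k z = true := by
              simp only [h1, if_false, h2, List.all_eq_true] at hy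
              exact hy
            have hc : costB d (k+1) y = 1 + (comps.map (costB d k)).sum := by
              rw [costB, hl]; simp [h1, h2]
            have hstep : costB d (k+1) y + (ys.map (costB d (k+1))).sum + fuel
                = ((comps.map (costB d k)).sum + ((ys.map (costB d (k+1))).sum + fuel)) + 1 := by
              omega
            rw [hstep, machineB, hl]
            simp only [if_neg h1, if_neg h2]
            have hrevsum : ((comps.reverse.map (costB d k)).sum) = (comps.map (costB d k)).sum := by
              rw [List.map_reverse, List.sum_reverse]
            have hallrev : ∀ z ∈ comps.reverse, okN d k z = true := by
              intro z hz; exact hall z (List.mem_reverse.mp hz)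
            have := ih comps.reverse hallrev ((ys.map (costB d (k+1))).sum + fuel) (ys ++ rest)
              (out ++ comps.reverse)
            rw [hrevsum] at this
            rw [this]
            rw [ihy hys' _]
            have hout : out ++ comps.reverse ++ comps.reverse.flatMap (fun z => (expandA d k z).reverse)
                = out ++ (expandA d (k+1) y).reverse := by
              simp [expandA, hl, h1, h2, List.reverse_append, List.append_assoc,
                List.reverse_flatMap, Function.comp_def]
            rw [hout, List.append_assoc]

lemma machineB_nil (d : List (String × List String)) (fuel : Nat) (out : List String) :
    machineB d fuel [] out = out := by
  cases fuel <;> rfl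

theorem get_all_compo_spec : Claim_equal_get_all_compo := by
  unfold Claim_equal_get_all_compo
  intro c d _ hpre
  unfold Spec_get_all_compo get_all_compo get_all_compo_alt Pre_get_all_compo at *
  set K := d.length + 2 with hK
  set BF := (maxLenB d + 1) ^ K with hBF
  have hcost : costB d K c ≤ BF := costB_le d K c hpre
  have hrun := machineB_run d K [c] (by simpa using hpre) (BF - costB d K c) [] []
  simp only [List.map_cons, List.map_nil, List.sum_cons, List.sum_nil, List.append_nil,
    List.flatMap_cons, List.flatMap_nil, List.nil_append] at hrun
  have hfuel : costB d K c + 0 + (BF - costB d K c) = BF := by omega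
  rw [hfuel] at hrun
  rw [hrun, machineB_nil, List.reverse_reverse]
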